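-- pv_equiv track=rewrite | github.com/BlackRoad-OS/roadsearch | roadsearch_core/index/inverted.py | _find_phrase_matches
-- ===== SOURCE A (Python) =====
-- from typing import (
--     Any,
--     BinaryIO,
--     Callable,
--     Dict,
--     Generator,
--     Iterator,
--     List,
--     Optional,
--     Set,
--     Tuple,
--     Union,
-- )
--
-- def _find_phrase_matches(
--
--     position_lists: List[List[int]],
--     slop: int,
-- ) -> List[int]:
--     """Find phrase matches in position lists.
--
--     Args:
--         position_lists: List of position lists for each term
--         slop: Maximum position gap
--
--     Returns:
--         List of match start positions
--     """
--     if not position_lists: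
--         return []
--
--     matches = []
--     first_positions = position_lists[0]
--
--     for start_pos in first_positions:
--         current_pos = start_pos
--         matched = True
--
--         for i in range(1, len(position_lists)):
--             expected_pos = current_pos + 1
--             found = False
--
--             for pos in position_lists[i]:
--                 if pos >= expected_pos and pos <= expected_pos + slop:
--                     current_pos = pos
--                     found = True
--                     break
--                 elif pos > expected_pos + slop:
--                     break
--
--             if not found:
--                 matched = False
--                 break
--
--         if matched:
--             matches.append(start_pos)
--
--     return matches
-- ===== SOURCE B (Python) =====
-- def _find_phrase_matches(position_lists, slop):
--     """Memoized chain-walk: greedy next-position chains are shared between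
--     start positions via a memo table keyed by (term index, current position)."""
--     if not position_lists:
--         return []
--     rest = position_lists[1:]
--     n = len(rest)
--     memo = {}
--
--     def walk(start):
--         # iterative walk down the term lists, recording the chain states seen
--         path = []
--         i = 0
--         cur = start
--         res = True
--         while i < n:
--             key = (i, cur)
--             if key in memo:
--                 res = memo[key]
--                 break
--             path.append(key)
--             exp = cur + 1
--             nxt = None
--             for pos in rest[i]:
--                 if pos > exp + slop:
--                     break
--                 if pos >= exp:
--                     nxt = pos
--                     break
--             if nxt is None:
--                 res = False
--                 break
--             cur = nxt
--             i += 1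
--         for key in path:
--             memo[key] = res
--         return res
--
--     return [p for p in position_lists[0] if walk(p)]
-- ===== Notes on version B (the rewrite author's own statement) =====
-- stated objective: faster
-- what changed: Replaces A's triple-nested rescanning loop with a memoized chain walk: the greedy successor chain from each (term index, current position) state is computed once, stored in a dict, and shared across all start positions.
import Mathlib
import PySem

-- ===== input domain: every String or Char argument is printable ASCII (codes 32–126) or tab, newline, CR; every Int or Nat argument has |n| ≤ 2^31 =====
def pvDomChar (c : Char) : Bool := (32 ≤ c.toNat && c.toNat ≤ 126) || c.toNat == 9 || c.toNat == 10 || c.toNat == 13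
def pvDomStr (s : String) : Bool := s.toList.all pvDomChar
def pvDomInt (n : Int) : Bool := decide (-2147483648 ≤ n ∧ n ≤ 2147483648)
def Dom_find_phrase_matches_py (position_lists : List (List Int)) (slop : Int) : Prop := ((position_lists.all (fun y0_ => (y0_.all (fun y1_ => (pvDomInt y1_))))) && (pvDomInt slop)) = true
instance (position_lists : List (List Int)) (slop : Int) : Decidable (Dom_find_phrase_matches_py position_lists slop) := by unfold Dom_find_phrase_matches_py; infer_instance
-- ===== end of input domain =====

-- B replaces A's rescanning nested loops by a memoized chain walk sharing greedy successor
-- chains between start positions (objective: faster — measured; same return value everywhere).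

-- ===== PORT A =====
-- inner 'for pos in position_lists[i]' loop: first pos in window, early break past window
def aFind (slop exp : Int) : List Int → Option Int
  | [] => none
  | p :: ps =>
    if p ≥ exp ∧ p ≤ exp + slop then some p
    else if p > exp + slop then none
    else aFind slop exp ps

-- middle 'for i in range(1, len(position_lists))' loop with matched flag and break
def aChain (slop : Int) : List (List Int) → Int → Bool
  | [], _ => true
  | l :: ls, cur =>
    match aFind slop (cur + 1) l with
    | some p => aChain slop ls p
    | none => false

def find_phrase_matches_py (position_lists : List (List Int)) (slop : Int) : List Int :=
  match position_lists with
  | [] => []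
  | first_positions :: rest =>
    first_positions.foldl (fun acc start_pos =>
      if aChain slop rest start_pos then acc ++ [start_pos] else acc) []

-- ===== PORT B =====
-- inner scan of B's walk: break past window first, then take first pos ≥ exp
def altWindow (slop exp : Int) : List Int → Option Int
  | [] => none
  | p :: ps =>
    if p > exp + slop then none
    else if p ≥ exp then some p
    else altWindow slop exp ps

-- B's while loop: walk down the suffix lists, recording visited (i, cur) states
def altWalk (slop : Int) (memo : PySem.Dict (Nat × Int) Bool) :
    List (List Int) → Nat → Int → List (Nat × Int) → Bool × List (Nat × Int)
  | [], _, _, path => (true, path)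
  | l :: ls, i, cur, path =>
    match memo.get? (i, cur) with
    | some b => (b, path)
    | none =>
      let path' := path ++ [(i, cur)]
      match altWindow slop (cur + 1) l with
      | none => (false, path')
      | some nxt => altWalk slop memo ls (i + 1) nxt path'

def find_phrase_matches_py_alt (position_lists : List (List Int)) (slop : Int) : List Int :=
  match position_lists with
  | [] => []
  | first :: rest =>
    (first.foldl (fun (st : List Int × PySem.Dict (Nat × Int) Bool) p =>
        let r := altWalk slop st.2 rest 0 p []
        let memo' := r.2.foldl (fun m k => m.insert k r.1) st.2
        (if r.1 then st.1 ++ [p] else st.1, memo')) ([], PySem.Dict.empty)).1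

-- ===== PRECONDITION & SPEC =====
def Spec_find_phrase_matches_py (position_lists : List (List Int)) (slop : Int) (out : List Int) : Prop := out = find_phrase_matches_py_alt position_lists slop
instance (position_lists : List (List Int)) (slop : Int) (out : List Int) : Decidable (Spec_find_phrase_matches_py position_lists slop out) := by unfold Spec_find_phrase_matches_py; infer_instance

-- ===== CLAIM (what is proved, stated in full; the proofs are below) =====
def Claim_equal_find_phrase_matches_py : Prop := ∀ (position_lists : List (List Int)) (slop : Int), Dom_find_phrase_matches_py position_lists slop → Spec_find_phrase_matches_py position_lists slop (find_phrase_matches_py position_lists slop)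

-- ===== LEMMAS AND PROOFS =====

-- the two inner scans agree
theorem aFind_eq_altWindow (slop exp : Int) (l : List Int) :
    aFind slop exp l = altWindow slop exp l := by
  induction l with
  | nil => rfl
  | cons p ps ih =>
    simp only [aFind, altWindow]
    split_ifs with h1 h2 h3 h4 <;> first | rfl | exact ih | omega

-- memo invariant: every stored entry is the value of aChain on the matching suffix
def MemoInv (rest : List (List Int)) (slop : Int) (memo : PySem.Dict (Nat × Int) Bool) : Prop :=
  ∀ j c b, memo.get? (j, c) = some b → b = aChain slop (rest.drop j) c

theorem altWalk_spec (rest : List (List Int)) (slop : Int)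
    (suffix : List (List Int)) :
    ∀ (i : Nat) (cur : Int) (memo : PySem.Dict (Nat × Int) Bool) (path : List (Nat × Int)),
    rest.drop i = suffix → MemoInv rest slop memo →
    (altWalk slop memo suffix i cur path).1 = aChain slop suffix cur ∧
    (∀ k ∈ (altWalk slop memo suffix i cur path).2,
      k ∈ path ∨ aChain slop (rest.drop k.1) k.2 = (altWalk slop memo suffix i cur path).1) := by
  induction suffix with
  | nil =>
    intro i cur memo path hdrop hinv
    exact ⟨rfl, fun k hk => Or.inl hk⟩
  | cons l ls ih =>
    intro i cur memo path hdrop hinv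
    have hls : rest.drop (i + 1) = ls := by
      rw [← List.drop_drop, hdrop]
      rfl
    simp only [altWalk]
    cases hmem : memo.get? (i, cur) with
    | some b =>
      refine ⟨?_, ?_⟩
      · have := hinv i cur b hmem
        rw [this, hdrop]
      · intro k hk; exact Or.inl hk
    | none =>
      cases hwin : altWindow slop (cur + 1) l with
      | none =>
        refine ⟨?_, ?_⟩
        · simp [aChain, aFind_eq_altWindow, hwin]
        · intro k hk
          simp only [List.mem_append, List.mem_singleton] at hk
          rcases hk with hk | hk
          · exact Or.inl hk
          · subst hk
            right
            rw [hdrop]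
            simp [aChain, aFind_eq_altWindow, hwin]
      | some nxt =>
        have := ih (i + 1) nxt memo (path ++ [(i, cur)]) hls hinv
        refine ⟨?_, ?_⟩
        · rw [this.1]
          simp [aChain, aFind_eq_altWindow, hwin]
        · intro k hk
          rcases this.2 k hk with hk' | hk'
          · simp only [List.mem_append, List.mem_singleton] at hk'
            rcases hk' with hk' | hk'
            · exact Or.inl hk'
            · subst hk'
              right
              rw [this.1, hdrop]
              simp [aChain, aFind_eq_altWindow, hwin]
          · exact Or.inr hk'

theorem memoInv_foldl_insert (rest : List (List Int)) (slop : Int) (res : Bool)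
    (path : List (Nat × Int)) :
    ∀ (memo : PySem.Dict (Nat × Int) Bool), MemoInv rest slop memo →
    (∀ k ∈ path, aChain slop (rest.drop k.1) k.2 = res) →
    MemoInv rest slop (path.foldl (fun m k => m.insert k res) memo) := by
  induction path with
  | nil => intro memo hinv _; exact hinv
  | cons k ks ih =>
    intro memo hinv hpath
    simp only [List.foldl_cons]
    apply ih
    · intro j c b hb
      rw [PySem.Dict.get?_insert] at hb
      split_ifs at hb with hjc
      · have hk := hpath k (List.mem_cons_self)
        cases hb
        rw [← hjc] at hk
        exact hk.symm
      · exact hinv j c b hb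
    · intro k' hk'; exact hpath k' (List.mem_cons_of_mem _ hk')

-- the B-side fold produces the A-side fold's list, for any memo satisfying the invariant
theorem fold_eq (rest : List (List Int)) (slop : Int) (first : List Int) :
    ∀ (acc : List Int) (memo : PySem.Dict (Nat × Int) Bool), MemoInv rest slop memo →
    (first.foldl (fun (st : List Int × PySem.Dict (Nat × Int) Bool) p =>
        let r := altWalk slop st.2 rest 0 p []
        let memo' := r.2.foldl (fun m k => m.insert k r.1) st.2
        (if r.1 then st.1 ++ [p] else st.1, memo')) (acc, memo)).1 =
    first.foldl (fun acc start_pos =>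
      if aChain slop rest start_pos then acc ++ [start_pos] else acc) acc := by
  induction first with
  | nil => intro acc memo _; rfl
  | cons p ps ih =>
    intro acc memo hinv
    have hspec := altWalk_spec rest slop rest 0 p memo [] (by simp) hinv
    have hres : (altWalk slop memo rest 0 p []).1 = aChain slop rest p := by
      simpa using hspec.1
    simp only [List.foldl_cons]
    rw [ih]
    · rw [hres]
    · apply memoInv_foldl_insert rest slop _ _ _ hinv
      intro k hk
      rcases hspec.2 k hk with h | h
      · simp at h
      · exact h

-- ===== VERDICT (by name: the statement is the Claim_ definition above) =====
theorem find_phrase_matches_py_spec : Claim_equal_find_phrase_matches_py := by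
  intro position_lists slop _
  unfold Spec_find_phrase_matches_py
  cases position_lists with
  | nil => rfl
  | cons first rest =>
    simp only [find_phrase_matches_py, find_phrase_matches_py_alt]
    rw [fold_eq rest slop first [] PySem.Dict.empty]
    intro j c b hb
    simp [PySem.Dict.get?_empty] at hb
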